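-- pv_equiv track=rewrite | github.com/Chennian-Zhao/JavaSE_Journey | programmercarl/src/com/linklist/12.py | range_result
-- ===== SOURCE A (Python) =====
-- def range_result(stud_id, results):
--     grades = []
--     for result in results:
--         if result[1] == stud_id:
--             grades.append(result[2])
--     if grades:
--         return max(grades) - min(grades)
--     else:
--         return 0
-- ===== SOURCE B (Python) =====
-- def range_result(stud_id, results):
--     srt = sorted(results, key=lambda r: r[2])
--     lo = next((r for r in srt if r[1] == stud_id), None)
--     if lo is None:
--         return 0
--     hi = next((r for r in reversed(srt) if r[1] == stud_id), None)
--     return hi[2] - lo[2]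
-- ===== Notes on version B (the rewrite author's own statement) =====
-- stated objective: alternative
-- what changed: Sort the whole result list by grade once, then the range is last-matching-row grade minus first-matching-row grade found by scanning the sorted list from each end; no grades list and no max()/min() aggregation passes.
import Mathlib
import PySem

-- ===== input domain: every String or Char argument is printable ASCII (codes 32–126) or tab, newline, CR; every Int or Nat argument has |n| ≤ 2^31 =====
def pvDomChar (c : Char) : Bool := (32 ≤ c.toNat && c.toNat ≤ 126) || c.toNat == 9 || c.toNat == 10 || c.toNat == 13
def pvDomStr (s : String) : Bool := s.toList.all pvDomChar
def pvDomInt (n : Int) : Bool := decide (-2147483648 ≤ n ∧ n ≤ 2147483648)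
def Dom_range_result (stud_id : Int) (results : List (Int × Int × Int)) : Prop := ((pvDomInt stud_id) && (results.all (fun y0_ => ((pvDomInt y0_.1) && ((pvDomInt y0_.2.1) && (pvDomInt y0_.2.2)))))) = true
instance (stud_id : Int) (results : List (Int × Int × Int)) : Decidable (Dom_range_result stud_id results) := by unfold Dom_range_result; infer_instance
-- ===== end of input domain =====

-- B sorts the whole list by grade once and reads the range off the first/last matching row, instead of A's filter-into-a-list plus max()/min() passes (objective: alternative).

-- ===== PORT A =====
-- the `for` loop appending matching grades
def rrGrades (stud_id : Int) (results : List (Int × Int × Int)) : List Int :=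
  results.foldl (fun g r => if r.2.1 = stud_id then g ++ [r.2.2] else g) []

-- `max(grades)` / `min(grades)` are the running-max/min loops over a nonempty list
def range_result (stud_id : Int) (results : List (Int × Int × Int)) : Int :=
  match rrGrades stud_id results with
  | [] => 0
  | h :: t => (t.foldl max h) - (t.foldl min h)

-- ===== PORT B =====
def range_result_alt (stud_id : Int) (results : List (Int × Int × Int)) : Int :=
  let srt := PySem.List.sorted results (fun r => r.2.2) false
  match srt.find? (fun r => r.2.1 == stud_id) with
  | none => 0
  | some lo =>
    match srt.reverse.find? (fun r => r.2.1 == stud_id) with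
    | none => 0   -- unreachable: the forward scan already found a match
    | some hi => hi.2.2 - lo.2.2

-- ===== PRECONDITION & SPEC =====
def Spec_range_result (stud_id : Int) (results : List (Int × Int × Int)) (out : Int) : Prop := out = range_result_alt stud_id results
instance (stud_id : Int) (results : List (Int × Int × Int)) (out : Int) : Decidable (Spec_range_result stud_id results out) := by unfold Spec_range_result; infer_instance

-- ===== CLAIM (what is proved, stated in full; the proofs are below) =====
def Claim_equal_range_result : Prop := ∀ (stud_id : Int) (results : List (Int × Int × Int)), Dom_range_result stud_id results → Spec_range_result stud_id results (range_result stud_id results)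

-- ===== LEMMAS AND PROOFS =====

-- find? is the head of the filtered list
theorem rr_find?_eq_head?_filter {α : Type} (p : α → Bool) (l : List α) :
    l.find? p = (l.filter p).head? := by
  induction l with
  | nil => rfl
  | cons a t ih =>
    by_cases h : p a = true
    · rw [List.find?_cons_of_pos h, List.filter_cons_of_pos h, List.head?_cons]
    · rw [List.find?_cons_of_neg (by simp [h]), List.filter_cons_of_neg (by simp [h]), ih]

-- A's append loop builds map-of-filter
theorem rrGrades_eq (stud_id : Int) (results : List (Int × Int × Int)) :
    rrGrades stud_id results
      = (results.filter (fun r => r.2.1 == stud_id)).map (fun r => r.2.2) := by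
  unfold rrGrades
  suffices h : ∀ (l : List (Int × Int × Int)) (acc : List Int),
      l.foldl (fun g r => if r.2.1 = stud_id then g ++ [r.2.2] else g) acc
        = acc ++ (l.filter (fun r => r.2.1 == stud_id)).map (fun r => r.2.2) by
    simpa using h results []
  intro l
  induction l with
  | nil => simp
  | cons a t ih =>
    intro acc
    by_cases h : a.2.1 = stud_id <;> simp [h, ih]

-- core of the equivalence, stated for an abstract sorted-by-grade rearrangement srt
theorem rr_core (stud_id : Int) (results srt : List (Int × Int × Int))
    (hperm : (srt.filter (fun r => r.2.1 == stud_id)).Perm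
               (results.filter (fun r => r.2.1 == stud_id)))
    (hpw : (srt.filter (fun r => r.2.1 == stud_id)).Pairwise (fun a b => a.2.2 ≤ b.2.2)) :
    (match (results.filter (fun r => r.2.1 == stud_id)).map (fun r => r.2.2) with
      | [] => (0 : Int)
      | h :: t => (t.foldl max h) - (t.foldl min h))
    = (match srt.find? (fun r => r.2.1 == stud_id) with
      | none => (0 : Int)
      | some lo =>
        match srt.reverse.find? (fun r => r.2.1 == stud_id) with
        | none => 0
        | some hi => hi.2.2 - lo.2.2) := by
  rw [rr_find?_eq_head?_filter, rr_find?_eq_head?_filter, List.filter_reverse]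
  cases hF : srt.filter (fun r => r.2.1 == stud_id) with
  | nil =>
    have h0 : results.filter (fun r => r.2.1 == stud_id) = [] := (hF ▸ hperm.symm).eq_nil
    simp [h0]
  | cons f0 frest =>
    rw [hF] at hperm hpw
    cases hG : results.filter (fun r => r.2.1 == stud_id) with
    | nil =>
      rw [hG] at hperm
      exact absurd hperm.eq_nil (by simp)
    | cons a l =>
      rw [hG] at hperm
      cases hR : (f0 :: frest).reverse with
      | nil => simp at hR
      | cons g0 grest =>
        simp only [List.map_cons, List.head?_cons]
        have hmem_iff : ∀ x, x ∈ f0 :: frest ↔ x ∈ a :: l := fun x => hperm.mem_iff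
        have hmem_iffR : ∀ x, x ∈ g0 :: grest ↔ x ∈ a :: l := by
          intro x; rw [← hR, List.mem_reverse]; exact hperm.mem_iff
        have hf0_le : ∀ y ∈ f0 :: frest, f0.2.2 ≤ y.2.2 := by
          intro y hy
          rcases List.mem_cons.1 hy with h | h
          · exact le_of_eq (by rw [h])
          · exact (List.pairwise_cons.1 hpw).1 y h
        have hg0_ge : ∀ y ∈ g0 :: grest, y.2.2 ≤ g0.2.2 := by
          have hpwR : (g0 :: grest).Pairwise (fun x y => y.2.2 ≤ x.2.2) := by
            rw [← hR]; exact (List.pairwise_reverse).2 hpw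
          intro y hy
          rcases List.mem_cons.1 hy with h | h
          · exact le_of_eq (by rw [h])
          · exact (List.pairwise_cons.1 hpwR).1 y h
        have hminle := PySem.List.foldl_min_le (l.map (fun r => r.2.2)) a.2.2
        have hmaxle := PySem.List.le_foldl_max (l.map (fun r => r.2.2)) a.2.2
        have hminmem : (l.map (fun r => r.2.2)).foldl min a.2.2 ∈ (a :: l).map (fun r => r.2.2) := by
          rcases PySem.List.foldl_min_mem (l.map (fun r => r.2.2)) a.2.2 with h | h
          · simp [h]
          · simp only [List.map_cons, List.mem_cons]; right; exact h
        have hmaxmem : (l.map (fun r => r.2.2)).foldl max a.2.2 ∈ (a :: l).map (fun r => r.2.2) := by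
          rcases PySem.List.foldl_max_mem (l.map (fun r => r.2.2)) a.2.2 with h | h
          · simp [h]
          · simp only [List.map_cons, List.mem_cons]; right; exact h
        have hf0_eq : f0.2.2 = (l.map (fun r => r.2.2)).foldl min a.2.2 := by
          apply le_antisymm
          · rcases List.mem_map.1 hminmem with ⟨y, hy, hyk⟩
            rw [← hyk]
            exact hf0_le y ((hmem_iff y).2 hy)
          · have hf0mem : f0 ∈ a :: l := (hmem_iff f0).1 List.mem_cons_self
            rcases List.mem_cons.1 hf0mem with h | h
            · rw [h]; exact hminle.1
            · exact hminle.2 f0.2.2 (List.mem_map.2 ⟨f0, h, rfl⟩)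
        have hg0_eq : g0.2.2 = (l.map (fun r => r.2.2)).foldl max a.2.2 := by
          apply le_antisymm
          · have hg0mem : g0 ∈ a :: l := (hmem_iffR g0).1 List.mem_cons_self
            rcases List.mem_cons.1 hg0mem with h | h
            · rw [h]; exact hmaxle.1
            · exact hmaxle.2 g0.2.2 (List.mem_map.2 ⟨g0, h, rfl⟩)
          · rcases List.mem_map.1 hmaxmem with ⟨y, hy, hyk⟩
            rw [← hyk]
            exact hg0_ge y ((hmem_iffR y).2 hy)
        rw [hf0_eq, hg0_eq]

-- ===== VERDICT (by name: the statement is the Claim_ definition above) =====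
theorem range_result_spec : Claim_equal_range_result := by
  intro stud_id results _
  unfold Spec_range_result range_result range_result_alt
  rw [rrGrades_eq]
  exact rr_core stud_id results (PySem.List.sorted results (fun r => r.2.2) false)
    ((PySem.List.sorted_perm results (fun r => r.2.2) false).filter _)
    (List.Pairwise.sublist List.filter_sublist
      (PySem.List.sorted_pairwise results (fun r => r.2.2)))
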